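-- pv_equiv track=rewrite | github.com/Mick3y-ko/genKids | genKids.py | addPattern
-- ===== SOURCE A (Python) =====
-- def addPattern(wordlist, extNumber):
--
--     # 숫자 패턴
--     digits      = [
--                     '1234', '1324', '123',  '12',   '11',   '1',    '2',
--                   ]
--
--     # 특수문자 패턴
--     characters  = [
--                 '!',    '@',    '#',    '!!',   '@@',   '##',   '!@',
--                 '!@#',  '@#',   '^^',   '~~',   '%',    '%%',   '_',
--                 '*',    '**',   '$',    '$$',   '+',    '!^'
--                   ]
--
--
--
--     if extNumber is not None:
--         digits.append(extNumber)
--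
--     result = []
--
--     # 문자 + 특수문자 + 숫자 조합 생성
--     temp = []
--     for char in characters:
--         for digit in digits:
--             temp.append(char + digit)
--     for item in temp:
--         for word in wordlist:
--             result.append(word + item)
--
--
--     # 문자 + 숫자 + 특수문자 조합 생성
--     temp = []
--     for digit in digits:
--         for char in characters:
--             temp.append(digit + char)
--     for item in temp:
--         for word in wordlist:
--             result.append(word + item)
--
--
--     # 특수문자 + 숫자 + 문자 조합 생성
--     temp = []
--     for char in characters:
--         for digit in digits:
--             temp.append(char + digit)
--     for item in temp:
--         for word in wordlist:
--             result.append(item + word)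
--
--
--     # 특수문자 + 문자 + 숫자 조합 생성
--     temp = []
--     for char in characters:
--         for word in wordlist:
--             temp.append(char + word)
--
--     for item in temp:
--         for digit in digits:
--             result.append(item + digit)
--
--     # 숫자 + 문자 + 특수문자 조합 생성
--     temp = []
--     for digit in digits:
--         for word in wordlist:
--             temp.append(digit + word)
--
--     for item in temp:
--         for char in characters:
--             result.append(item + char)
--
--     # 숫자 + 특수문자 + 문자 조합 생성
--     temp = []
--     for digit in digits:
--         for char in characters:
--             temp.append(digit + char)
--     for item in temp:
--         for word in wordlist:
--             result.append(item + word)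
--
--
--     # 생성한 두가지 조합 리스트를 인자로 전달된 리스트와 결합
--
--     return result
-- ===== SOURCE B (Python) =====
-- def addPattern(wordlist, extNumber):
--     digits = ['1234', '1324', '123', '12', '11', '1', '2']
--     characters = ['!', '@', '#', '!!', '@@', '##', '!@',
--                   '!@#', '@#', '^^', '~~', '%', '%%', '_',
--                   '*', '**', '$', '$$', '+', '!^']
--     if extNumber is not None:
--         digits.append(extNumber)
--
--     seqs = {'c': characters, 'd': digits, 'w': wordlist}
--     # each spec = (nesting order of the loops, order of concatenation)
--     specs = [('cdw', 'wcd'), ('dcw', 'wdc'), ('cdw', 'cdw'),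
--              ('cwd', 'cwd'), ('dwc', 'dwc'), ('dcw', 'dcw')]
--
--     result = []
--     for it, jo in specs:
--         for x in seqs[it[0]]:
--             for y in seqs[it[1]]:
--                 for z in seqs[it[2]]:
--                     env = {it[0]: x, it[1]: y, it[2]: z}
--                     result.append(env[jo[0]] + env[jo[1]] + env[jo[2]])
--     return result
-- ===== Notes on version B (the rewrite author's own statement) =====
-- stated objective: simpler
-- what changed: Replaces the six copy-pasted two-phase blocks (build temp, then combine) with one data-driven triple loop over six ordering specs, each recording the loop-nesting order and the concatenation order separately.
import Mathlib
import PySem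

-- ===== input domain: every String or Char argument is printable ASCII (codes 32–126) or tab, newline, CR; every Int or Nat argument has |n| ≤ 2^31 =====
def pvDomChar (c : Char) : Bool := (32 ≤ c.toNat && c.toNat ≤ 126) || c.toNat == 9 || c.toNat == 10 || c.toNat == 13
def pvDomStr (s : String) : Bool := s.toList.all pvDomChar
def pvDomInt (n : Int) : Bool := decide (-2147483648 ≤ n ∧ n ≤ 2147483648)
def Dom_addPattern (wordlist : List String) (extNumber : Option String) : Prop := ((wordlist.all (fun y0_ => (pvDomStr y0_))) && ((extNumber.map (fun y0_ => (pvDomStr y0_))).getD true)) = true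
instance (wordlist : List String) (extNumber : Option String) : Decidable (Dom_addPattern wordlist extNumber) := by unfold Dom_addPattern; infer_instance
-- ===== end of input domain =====

-- B replaces A's six copy-pasted two-phase blocks by one data-driven loop over six
-- (nesting-order, concatenation-order) specifications; same output, simpler structure.

-- ===== PORT A =====
def addPattern (wordlist : List String) (extNumber : Option String) : List String :=
  let digits : List String := ["1234", "1324", "123", "12", "11", "1", "2"]
  let characters : List String :=
    ["!", "@", "#", "!!", "@@", "##", "!@",
     "!@#", "@#", "^^", "~~", "%", "%%", "_",
     "*", "**", "$", "$$", "+", "!^"]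
  let digits := match extNumber with
    | some e => digits ++ [e]
    | none => digits
  -- 문자 + 특수문자 + 숫자
  let temp := characters.flatMap (fun char => digits.map (fun digit => char ++ digit))
  let result := temp.flatMap (fun item => wordlist.map (fun word => word ++ item))
  -- 문자 + 숫자 + 특수문자
  let temp := digits.flatMap (fun digit => characters.map (fun char => digit ++ char))
  let result := result ++ temp.flatMap (fun item => wordlist.map (fun word => word ++ item))
  -- 특수문자 + 숫자 + 문자
  let temp := characters.flatMap (fun char => digits.map (fun digit => char ++ digit))
  let result := result ++ temp.flatMap (fun item => wordlist.map (fun word => item ++ word))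
  -- 특수문자 + 문자 + 숫자
  let temp := characters.flatMap (fun char => wordlist.map (fun word => char ++ word))
  let result := result ++ temp.flatMap (fun item => digits.map (fun digit => item ++ digit))
  -- 숫자 + 문자 + 특수문자
  let temp := digits.flatMap (fun digit => wordlist.map (fun word => digit ++ word))
  let result := result ++ temp.flatMap (fun item => characters.map (fun char => item ++ char))
  -- 숫자 + 특수문자 + 문자
  let temp := digits.flatMap (fun digit => characters.map (fun char => digit ++ char))
  let result := result ++ temp.flatMap (fun item => wordlist.map (fun word => item ++ word))
  result

-- ===== PORT B =====
-- seqs lookup: 'c' ↦ characters, 'd' ↦ digits, 'w' ↦ wordlist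
def pvPick (c d w : List String) (k : Char) : List String :=
  if k = 'c' then c else if k = 'd' then d else w

-- one spec: ((nesting order), (concatenation order)); the triple loop in B's body
def pvGen (c d w : List String) (spec : (Char × Char × Char) × (Char × Char × Char)) :
    List String :=
  (pvPick c d w spec.1.1).flatMap fun x =>
    (pvPick c d w spec.1.2.1).flatMap fun y =>
      (pvPick c d w spec.1.2.2).map fun z =>
        let env := fun k => if k = spec.1.1 then x else if k = spec.1.2.1 then y else z
        env spec.2.1 ++ env spec.2.2.1 ++ env spec.2.2.2

def addPattern_alt (wordlist : List String) (extNumber : Option String) : List String :=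
  let digits : List String := ["1234", "1324", "123", "12", "11", "1", "2"]
  let characters : List String :=
    ["!", "@", "#", "!!", "@@", "##", "!@",
     "!@#", "@#", "^^", "~~", "%", "%%", "_",
     "*", "**", "$", "$$", "+", "!^"]
  let digits := match extNumber with
    | some e => digits ++ [e]
    | none => digits
  let specs : List ((Char × Char × Char) × (Char × Char × Char)) :=
    [(('c','d','w'),('w','c','d')), (('d','c','w'),('w','d','c')),
     (('c','d','w'),('c','d','w')), (('c','w','d'),('c','w','d')),
     (('d','w','c'),('d','w','c')), (('d','c','w'),('d','c','w'))]
  specs.flatMap (pvGen characters digits wordlist)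

-- ===== PRECONDITION & SPEC =====
def Spec_addPattern (wordlist : List String) (extNumber : Option String) (out : List String) : Prop := out = addPattern_alt wordlist extNumber
instance (wordlist : List String) (extNumber : Option String) (out : List String) : Decidable (Spec_addPattern wordlist extNumber out) := by unfold Spec_addPattern; infer_instance

-- ===== CLAIM (what is proved, stated in full; the proofs are below) =====
def Claim_equal_addPattern : Prop := ∀ (wordlist : List String) (extNumber : Option String), Dom_addPattern wordlist extNumber → Spec_addPattern wordlist extNumber (addPattern wordlist extNumber)

-- ===== LEMMAS AND PROOFS =====

-- A's two-phase block (build temp of pairs, then combine each with w on the left)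
-- equals the single triple loop.
theorem two_phase_left (a b w : List String) (f : String → String → String) :
    (a.flatMap fun x => b.map fun y => f x y).flatMap (fun item => w.map fun z => z ++ item)
      = a.flatMap fun x => b.flatMap fun y => w.map fun z => z ++ f x y := by
  induction a with
  | nil => rfl
  | cons h t ih => simp [List.flatMap_cons, List.flatMap_append, ih, List.flatMap_map]

-- same with the pair concatenated on the left of w
theorem two_phase_right (a b w : List String) (f : String → String → String) :
    (a.flatMap fun x => b.map fun y => f x y).flatMap (fun item => w.map fun z => item ++ z)
      = a.flatMap fun x => b.flatMap fun y => w.map fun z => f x y ++ z := by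
  induction a with
  | nil => rfl
  | cons h t ih => simp [List.flatMap_cons, List.flatMap_append, ih, List.flatMap_map]

-- the six blocks of A, with the three sequences abstract, equal B's spec-driven loop
theorem blocks_eq (c d w : List String) :
    (c.flatMap fun x => d.map fun y => x ++ y).flatMap (fun item => w.map fun z => z ++ item)
      ++ ((d.flatMap fun y => c.map fun x => y ++ x).flatMap (fun item => w.map fun z => z ++ item)
      ++ ((c.flatMap fun x => d.map fun y => x ++ y).flatMap (fun item => w.map fun z => item ++ z)
      ++ ((c.flatMap fun x => w.map fun z => x ++ z).flatMap (fun item => d.map fun y => item ++ y)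
      ++ ((d.flatMap fun y => w.map fun z => y ++ z).flatMap (fun item => c.map fun x => item ++ x)
      ++ (d.flatMap fun y => c.map fun x => y ++ x).flatMap (fun item => w.map fun z => item ++ z)))))
      = [(('c','d','w'),('w','c','d')), (('d','c','w'),('w','d','c')),
         (('c','d','w'),('c','d','w')), (('c','w','d'),('c','w','d')),
         (('d','w','c'),('d','w','c')), (('d','c','w'),('d','c','w'))].flatMap
          (pvGen c d w) := by
  simp only [List.flatMap_cons, List.flatMap_nil, List.append_nil, pvGen, pvPick,
    two_phase_left, two_phase_right]
  simp [String.append_assoc]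

-- ===== VERDICT (by name: the statement is the Claim_ definition above) =====
theorem addPattern_spec : Claim_equal_addPattern := by
  intro wordlist extNumber _
  show addPattern wordlist extNumber = addPattern_alt wordlist extNumber
  cases extNumber <;>
    · simp only [addPattern, addPattern_alt, List.append_assoc]
      exact blocks_eq _ _ _
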